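-- pv_equiv track=rewrite | github.com/antczkon/zabawa_slownikowa | Project_test/main.py | num_of_days_in_months
-- ===== SOURCE A (Python) =====
-- def num_of_days_in_months(months_list):
--     dict_of_days_in_months={}
--     for month in months_list:
--         if month not in dict_of_days_in_months.keys():
--             dict_of_days_in_months[month] = 1
--         else:
--             dict_of_days_in_months[month] +=1
--     return dict_of_days_in_months
-- ===== SOURCE B (Python) =====
-- def num_of_days_in_months(months_list):
--     # Repeatedly peel off the first remaining month: filter it out of the rest
--     # and read its count off as the length difference. No dict lookups/updates
--     # per element, no list.count.
--     result = {}
--     rest = months_list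
--     while rest:
--         m = rest[0]
--         smaller = [x for x in rest[1:] if x != m]
--         result[m] = len(rest) - len(smaller)
--         rest = smaller
--     return result
-- ===== Notes on version B (the rewrite author's own statement) =====
-- stated objective: alternative
-- what changed: Replaces A's single accumulating dict pass (membership test + increment per element) with a peel-and-filter loop: take the first remaining month, filter all its occurrences out of the remainder, and record its count as the length difference; the dict is written once per distinct month.
import Mathlib
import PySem

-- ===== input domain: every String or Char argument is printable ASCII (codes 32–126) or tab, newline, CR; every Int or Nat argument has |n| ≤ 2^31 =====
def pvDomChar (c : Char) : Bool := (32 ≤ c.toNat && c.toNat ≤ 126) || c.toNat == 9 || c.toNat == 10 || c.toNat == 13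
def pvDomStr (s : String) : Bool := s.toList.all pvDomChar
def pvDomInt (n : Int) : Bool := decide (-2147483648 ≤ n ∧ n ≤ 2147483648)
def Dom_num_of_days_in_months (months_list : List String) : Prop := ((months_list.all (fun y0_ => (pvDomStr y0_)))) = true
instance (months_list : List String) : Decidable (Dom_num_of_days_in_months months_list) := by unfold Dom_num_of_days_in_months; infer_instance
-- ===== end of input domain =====

-- B replaces A's per-element dict pass by a peel-and-filter loop (each distinct month's count read off as a length difference); alternative decomposition, not faster.

-- ===== PORT A =====
-- d[month] = 1 if absent, else d[month] += 1 (get-then-set)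
def num_of_days_in_months (months_list : List String) : List (String × Int) :=
  (months_list.foldl
    (fun d month =>
      if d.contains month = false then d.insert month 1
      else d.insert month (d.getD month 0 + 1))
    PySem.Dict.empty).items

-- ===== PORT B =====
-- the 'while rest:' loop of Source B: peel the first month, filter it out, record the length difference
def pvPeelLoop (result : PySem.Dict String Int) (rest : List String) : List (String × Int) :=
  match rest with
  | [] => result.items
  | m :: t =>
    let smaller := t.filter (fun x => x != m)
    pvPeelLoop (result.insert m ((rest.length : Int) - (smaller.length : Int))) smaller
termination_by rest.length
decreasing_by
  simp only [List.length_cons, List.unattach_filter, List.unattach_attach]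
  have := List.length_filter_le (fun x => x != m) t
  omega

def num_of_days_in_months_alt (months_list : List String) : List (String × Int) :=
  pvPeelLoop PySem.Dict.empty months_list

-- ===== PRECONDITION & SPEC =====
def Spec_num_of_days_in_months (months_list : List String) (out : List (String × Int)) : Prop := out = num_of_days_in_months_alt months_list
instance (months_list : List String) (out : List (String × Int)) : Decidable (Spec_num_of_days_in_months months_list out) := by unfold Spec_num_of_days_in_months; infer_instance

-- ===== CLAIM (what is proved, stated in full; the proofs are below) =====
def Claim_equal_num_of_days_in_months : Prop := ∀ (months_list : List String), Dom_num_of_days_in_months months_list → Spec_num_of_days_in_months months_list (num_of_days_in_months months_list)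

-- ===== LEMMAS AND PROOFS =====

-- A's branching step is pointwise the counter step.
theorem pv_step_eq :
    (fun (d : PySem.Dict String Int) (month : String) =>
      if d.contains month = false then d.insert month 1
      else d.insert month (d.getD month 0 + 1))
    = (fun d month => d.insert month (d.getD month 0 + 1)) := by
  funext d month
  by_cases h : d.contains month = false
  · simp [h, PySem.Dict.getD_of_not_contains d (0 : Int) h]
  · simp [h]

theorem pv_add_cons (s : List String) (m x : String) (hx : x ≠ m) :
    PySem.Set.add (m :: s) x = m :: PySem.Set.add s x := by
  simp only [PySem.Set.add, PySem.Set.contains, List.contains_cons,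
    beq_eq_false_iff_ne.mpr hx, Bool.false_or]
  split <;> simp

theorem pv_add_mem (s : List String) (m : String) (hm : m ∈ s) :
    PySem.Set.add s m = s := by
  simp [PySem.Set.add, PySem.Set.contains, hm]

-- pushing a fold of Set.add under a head the tail never mentions
theorem pv_foldl_add_cons {s : List String} {m : String} :
    ∀ t : List String, (∀ x ∈ t, x ≠ m) →
      List.foldl PySem.Set.add (m :: s) t = m :: List.foldl PySem.Set.add s t := by
  intro t
  induction t generalizing s with
  | nil => intro _; rfl
  | cons x t ih =>
    intro h
    rw [List.foldl_cons, List.foldl_cons, pv_add_cons s m x (h x (by simp))]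
    exact ih (fun y hy => h y (by simp [hy]))

-- adding an element the accumulator already holds is a no-op through the fold
theorem pv_foldl_add_filter {m : String} :
    ∀ (t : List String) (s : List String), m ∈ s →
      List.foldl PySem.Set.add s t = List.foldl PySem.Set.add s (t.filter (fun x => x != m)) := by
  intro t
  induction t with
  | nil => intro s _; rfl
  | cons x t ih =>
    intro s hm
    by_cases h : x = m
    · subst h
      simp only [List.filter_cons, bne_self_eq_false, Bool.false_eq_true, if_false]
      rw [List.foldl_cons, pv_add_mem s x hm]
      exact ih s hm
    · simp only [List.filter_cons, bne_iff_ne, if_pos (by simpa using h)]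
      rw [List.foldl_cons, List.foldl_cons]
      apply ih
      simp [PySem.Set.add]
      split <;> simp [hm]

-- first-occurrence dedup peels exactly like Source B's loop
theorem pv_ofList_cons (m : String) (t : List String) :
    PySem.Set.ofList (m :: t) = m :: PySem.Set.ofList (t.filter (fun x => x != m)) := by
  rw [PySem.Set.ofList_eq_foldl, PySem.Set.ofList_eq_foldl, List.foldl_cons]
  have h1 : PySem.Set.add [] m = [m] := by simp [PySem.Set.add, PySem.Set.contains]
  rw [h1, pv_foldl_add_filter t [m] (List.mem_singleton_self m)]
  exact pv_foldl_add_cons _ (fun x hx => by simpa using (List.mem_filter.mp hx).2)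

theorem pv_len_filter (m : String) (t : List String) :
    (t.filter (fun x => x != m)).length + t.count m = t.length := by
  induction t with
  | nil => rfl
  | cons x t ih => by_cases h : x = m <;> simp [h] <;> omega

theorem pv_count_filter (m k : String) (t : List String) (hk : k ≠ m) :
    (t.filter (fun x => x != m)).count k = t.count k := by
  rw [List.count_filter]
  simp [hk]

-- loop invariant: with every month of rest fresh in result, the loop appends the counts
theorem pv_peel_spec :
    ∀ (rest : List String) (d : PySem.Dict String Int),
      (∀ k ∈ rest, d.contains k = false) →
      pvPeelLoop d rest
        = d.items ++ (PySem.Set.ofList rest).map (fun k => (k, (rest.count k : Int))) := by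
  intro rest d
  induction d, rest using pvPeelLoop.induct with
  | case1 d => intro _; simp [pvPeelLoop, PySem.Set.ofList]
  | case2 d m t smaller ih =>
    intro h
    simp only [smaller, List.unattach_filter, List.unattach_attach] at ih ⊢
    rw [pvPeelLoop]
    have hfresh : ∀ k ∈ t.filter (fun x => x != m),
        (d.insert m ((((m :: t).length : Nat) : Int) - ((t.filter (fun x => x != m)).length : Int))).contains k = false := by
      intro k hk
      have hkm : k ≠ m := by simpa using (List.mem_filter.mp hk).2
      have hkt : k ∈ t := (List.mem_filter.mp hk).1
      rw [PySem.Dict.contains_eq_isSome_get?, PySem.Dict.get?_insert_of_ne _ _ hkm,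
        ← PySem.Dict.contains_eq_isSome_get?]
      exact h k (by simp [hkt])
    rw [ih hfresh, PySem.Dict.items_insert_of_not_contains _ _ (h m (by simp))]
    rw [pv_ofList_cons m t]
    have hmap : (PySem.Set.ofList (t.filter (fun x => x != m))).map
          (fun k => (k, ((t.filter (fun x => x != m)).count k : Int)))
        = (PySem.Set.ofList (t.filter (fun x => x != m))).map (fun k => (k, ((m :: t).count k : Int))) := by
      apply List.map_congr_left
      intro k hk
      have hk' : k ∈ t.filter (fun x => x != m) := by simpa using (PySem.Set.mem_ofList _ _).mp hk
      have hkm : k ≠ m := by simpa using (List.mem_filter.mp hk').2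
      rw [pv_count_filter m k t hkm]; simp [Ne.symm hkm]
    simp [List.map_cons, hmap]
    have := pv_len_filter m t
    omega

-- ===== VERDICT (by name: the statement is the Claim_ definition above) =====
theorem num_of_days_in_months_spec : Claim_equal_num_of_days_in_months := by
  intro months_list _
  unfold Spec_num_of_days_in_months num_of_days_in_months num_of_days_in_months_alt
  rw [pv_step_eq, PySem.Dict.foldl_insert_getD_add_one_eq_counter, PySem.Dict.items_counter,
    pv_peel_spec months_list PySem.Dict.empty (by simp [PySem.Dict.contains_empty])]
  simp [PySem.Dict.empty]
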